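-- pv_equiv track=rewrite | github.com/path-0f-misantrope/semiotika | whhhusper.py | split_by_words_to_lines
-- ===== SOURCE A (Python) =====
-- def split_by_words_to_lines(text, min_words=5, max_words=6):
--     words = text.strip().split()
--     lines = []
--     current_line = []
--
--     for word in words:
--         current_line.append(word)
--         if len(current_line) >= max_words:
--             lines.append(" ".join(current_line))
--             current_line = []
--
--     if current_line:
--         lines.append(" ".join(current_line))
--
--     return lines
-- ===== SOURCE B (Python) =====
-- def split_by_words_to_lines(text, min_words=5, max_words=6):
--     words = text.strip().split()
--     return [" ".join(words[i:i + max_words]) for i in range(0, len(words), max_words)]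
-- ===== Notes on version B (the rewrite author's own statement) =====
-- stated objective: simpler
-- what changed: Replaced the stateful accumulate-and-flush loop (current_line buffer, size check, trailing flush) with arithmetic chunk boundaries: one comprehension over range(0, len(words), max_words) joining each slice words[i:i+max_words].
-- outside the precondition, e.g. on split_by_words_to_lines('a b', 5, 0): A returns ['a', 'b'], B raises ValueError; on split_by_words_to_lines('a b', 5, -2): A returns ['a', 'b'], B returns []
import Mathlib
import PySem

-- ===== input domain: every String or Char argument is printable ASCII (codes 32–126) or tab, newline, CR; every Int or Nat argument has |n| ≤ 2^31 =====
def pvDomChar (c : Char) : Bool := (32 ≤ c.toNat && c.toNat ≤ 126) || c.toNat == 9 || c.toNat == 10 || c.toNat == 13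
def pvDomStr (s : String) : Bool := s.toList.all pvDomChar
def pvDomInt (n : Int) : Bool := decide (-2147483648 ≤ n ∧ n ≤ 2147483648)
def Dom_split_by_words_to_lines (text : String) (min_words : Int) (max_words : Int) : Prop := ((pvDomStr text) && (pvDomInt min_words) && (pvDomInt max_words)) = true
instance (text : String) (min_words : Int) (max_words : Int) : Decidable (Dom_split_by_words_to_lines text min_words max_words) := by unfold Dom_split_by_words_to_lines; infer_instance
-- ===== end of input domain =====

-- B replaces A's accumulate-and-flush loop by joining arithmetic slices words[i:i+max_words]
-- over range(0, len(words), max_words): same values, a simpler decomposition.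

-- ===== PORT A =====
def split_by_words_to_lines (text : String) (min_words : Int) (max_words : Int) : List String :=
  let words := PySem.Str.split₀ (PySem.Str.strip text)
  let st := words.foldl
    (fun (st : List String × List String) word =>
      let cur := st.2 ++ [word]
      if max_words ≤ (cur.length : Int) then (st.1 ++ [PySem.Str.join " " cur], [])
      else (st.1, cur))
    ([], [])
  if st.2 ≠ [] then st.1 ++ [PySem.Str.join " " st.2] else st.1

-- ===== PORT B =====
def split_by_words_to_lines_alt (text : String) (min_words : Int) (max_words : Int) : List String :=
  let words := PySem.Str.split₀ (PySem.Str.strip text)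
  (PySem.List.pyRange 0 (words.length : Int) max_words).map
    (fun i => PySem.Str.join " " (PySem.List.slice words (some i) (some (i + max_words))))

-- ===== PRECONDITION & SPEC =====
-- Pre_ excludes max_words < 1: there B's index-stepping naturally raises ValueError (step 0)
-- or yields no chunks (negative step), while A still returns one word per line.
def Pre_split_by_words_to_lines (text : String) (min_words : Int) (max_words : Int) : Prop :=
  1 ≤ max_words
instance (text : String) (min_words : Int) (max_words : Int) : Decidable (Pre_split_by_words_to_lines text min_words max_words) := by unfold Pre_split_by_words_to_lines; infer_instance

def pvWitness_split_by_words_to_lines : String × Int × Int := ("alpha beta gamma delta", 5, 3)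

def Spec_split_by_words_to_lines (text : String) (min_words : Int) (max_words : Int) (out : List String) : Prop := out = split_by_words_to_lines_alt text min_words max_words
instance (text : String) (min_words : Int) (max_words : Int) (out : List String) : Decidable (Spec_split_by_words_to_lines text min_words max_words out) := by unfold Spec_split_by_words_to_lines; infer_instance

-- ===== CLAIM (what is proved, stated in full; the proofs are below) =====
def Claim_equal_split_by_words_to_lines : Prop := ∀ (text : String) (min_words : Int) (max_words : Int), Dom_split_by_words_to_lines text min_words max_words → Pre_split_by_words_to_lines text min_words max_words → Spec_split_by_words_to_lines text min_words max_words (split_by_words_to_lines text min_words max_words)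

-- ===== LEMMAS AND PROOFS =====

-- pvChunks k ws: the lines obtained by cutting ws into blocks of k+1 words.
def pvChunks (k : Nat) : List String → List String
  | [] => []
  | w :: ws => PySem.Str.join " " (w :: ws.take k) :: pvChunks k (ws.drop k)
termination_by ws => ws.length
decreasing_by simp only [List.length_cons, List.length_drop]; omega

lemma pvChunks_nil (k : Nat) : pvChunks k [] = [] := by rw [pvChunks]

lemma pvChunks_cons (k : Nat) (w : String) (ws : List String) :
    pvChunks k (w :: ws) = PySem.Str.join " " (w :: ws.take k) :: pvChunks k (ws.drop k) := by
  rw [pvChunks]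

-- a full first chunk can be cut off
lemma pvChunks_append (k : Nat) (xs ys : List String) (hx : xs.length = k + 1) :
    pvChunks k (xs ++ ys) = PySem.Str.join " " xs :: pvChunks k ys := by
  cases xs with
  | nil => simp at hx
  | cons x xs' =>
      have hx' : xs'.length = k := by simpa using hx
      rw [List.cons_append, pvChunks_cons]
      have ht : (xs' ++ ys).take k = xs' := by
        rw [List.take_append_of_le_length (by omega), List.take_of_length_le (by omega)]
      have hd : (xs' ++ ys).drop k = ys := by
        rw [List.drop_append_of_le_length (by omega), List.drop_of_length_le (by omega)]
        simp
      rw [ht, hd]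

def pvFlush (st : List String × List String) : List String :=
  if st.2 ≠ [] then st.1 ++ [PySem.Str.join " " st.2] else st.1

-- A's loop, from an arbitrary state whose buffer is not yet full, followed by the flush,
-- yields the already-emitted lines and then the chunks of (buffer ++ remaining words).
lemma pvA_loop (k : Nat) (ws : List String) :
    ∀ (lines cur : List String), cur.length < k + 1 →
    pvFlush (ws.foldl
        (fun (st : List String × List String) word =>
          if ((k : Int) + 1) ≤ (((st.2 ++ [word]).length : Nat) : Int)
          then (st.1 ++ [PySem.Str.join " " (st.2 ++ [word])], [])
          else (st.1, st.2 ++ [word]))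
        (lines, cur)) = lines ++ pvChunks k (cur ++ ws) := by
  induction ws with
  | nil =>
      intro lines cur hcur
      cases cur with
      | nil => simp [pvFlush, pvChunks_nil]
      | cons c cs =>
          have h1 : cs.length < k := by simpa using hcur
          simp only [List.foldl_nil, List.append_nil, pvFlush, pvChunks_cons]
          rw [List.take_of_length_le (by omega), List.drop_of_length_le (by omega), pvChunks_nil]
          simp
  | cons w rest ih =>
      intro lines cur hcur
      rw [List.foldl_cons]
      dsimp only
      by_cases hfull : ((k : Int) + 1) ≤ (((cur ++ [w]).length : Nat) : Int)
      · have hfull' : k + 1 ≤ (cur ++ [w]).length := by exact_mod_cast hfull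
        have hlen : (cur ++ [w]).length = k + 1 := by
          simp only [List.length_append, List.length_cons, List.length_nil] at hfull' ⊢
          omega
        rw [if_pos hfull, ih _ [] (by simp)]
        have hsplit : cur ++ w :: rest = (cur ++ [w]) ++ rest := by simp
        rw [hsplit, pvChunks_append k (cur ++ [w]) rest hlen]
        simp
      · have hfull' : ¬ k + 1 ≤ (cur ++ [w]).length := by
          intro h; exact hfull (by exact_mod_cast h)
        have hlen : (cur ++ [w]).length < k + 1 := by omega
        rw [if_neg hfull, ih _ (cur ++ [w]) hlen]
        simp

-- B's map over the chunk start indices equals pvChunks.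
lemma pvB_map (k : Nat) : ∀ (n : Nat) (ws : List String), ws.length ≤ n →
    (List.range (if (0:Int) < (ws.length : Int) then (((ws.length : Int) - 0 + ((k:Int)+1) - 1) / ((k:Int)+1)).toNat else 0)).map
      (fun j => PySem.Str.join " " ((ws.drop ((k+1) * j)).take (k+1)))
      = pvChunks k ws := by
  intro n
  induction n with
  | zero =>
      intro ws hws
      have : ws = [] := List.length_eq_zero_iff.mp (by omega)
      subst this
      simp [pvChunks_nil]
  | succ n ih =>
      intro ws hws
      cases ws with
      | nil => simp [pvChunks_nil]
      | cons w rest =>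
          set L := rest.length with hL
          have hcond : (0:Int) < (((w :: rest).length : Nat) : Int) := by
            exact_mod_cast Nat.succ_pos rest.length
          have hcount : (((((w :: rest).length : Nat) : Int) - 0 + ((k:Int)+1) - 1) / ((k:Int)+1)).toNat
              = (L + k + 1) / (k + 1) := by
            have h1 : ((((w :: rest).length : Nat) : Int) - 0 + ((k:Int)+1) - 1) = ((L + k + 1 : Nat) : Int) := by
              simp only [List.length_cons, ← hL]
              push_cast
              ring
            rw [h1, show ((k:Int)+1) = ((k+1 : Nat) : Int) by push_cast; ring,
                ← Int.natCast_div, Int.toNat_natCast]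
          rw [if_pos hcond, hcount]
          have hM : (L + k + 1) / (k + 1) = (L + k + 1) / (k + 1) - 1 + 1 := by
            have : 1 ≤ (L + k + 1) / (k + 1) := Nat.one_le_div_iff (by omega) |>.mpr (by omega)
            omega
          rw [hM, List.range_succ_eq_map, List.map_cons, List.map_map]
          rw [pvChunks_cons]
          congr 1
          · have hdrop : ∀ j : Nat, (w :: rest).drop ((k+1) * (j+1)) = (rest.drop k).drop ((k+1) * j) := by
              intro j
              rw [show (k+1)*(j+1) = (k + (k+1)*j) + 1 by ring, List.drop_succ_cons, List.drop_drop]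
            have hfun : ((fun j => PySem.Str.join " " (((w :: rest).drop ((k+1) * j)).take (k+1))) ∘ (fun j => j + 1))
                = (fun j => PySem.Str.join " " ((((rest.drop k).drop ((k+1) * j))).take (k+1))) := by
              funext j
              simp only [Function.comp]
              rw [hdrop j]
            rw [hfun]
            have hlen' : (rest.drop k).length ≤ n := by
              simp only [List.length_drop]
              simp only [List.length_cons] at hws
              omega
            rw [← ih (rest.drop k) hlen']
            congr 1
            -- the chunk counts agree
            by_cases hLk : L ≤ k
            · have hdn : rest.drop k = [] := List.drop_eq_nil_of_le (by omega)
              rw [hdn]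
              simp only [List.length_nil]
              have h1 : (L + k + 1) / (k + 1) = 1 :=
                Nat.div_eq_of_lt_le (by omega) (by omega)
              simp [h1]
            · have hdl : ((rest.drop k).length : Nat) = L - k := by
                simp [List.length_drop, hL]
              have hpos : (0:Int) < (((rest.drop k).length : Nat) : Int) := by
                rw [hdl]; exact_mod_cast Nat.sub_pos_of_lt (by omega)
              rw [if_pos hpos]
              have h2 : ((((rest.drop k).length : Nat) : Int) - 0 + ((k:Int)+1) - 1)
                  = (((L - k + k : Nat)) : Int) := by
                rw [hdl]
                push_cast [Nat.sub_add_cancel (le_of_lt (by omega : k < L))]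
                omega
              rw [h2, show ((k:Int)+1) = ((k+1 : Nat) : Int) by push_cast; ring,
                  ← Int.natCast_div, Int.toNat_natCast]
              have h3 : L - k + k = L := Nat.sub_add_cancel (by omega)
              rw [h3, show L + k + 1 = L + (k + 1) by ring, Nat.add_div_right _ (by omega), Nat.add_sub_cancel]

-- ===== VERDICT (by name: the statement is the Claim_ definition above) =====
theorem split_by_words_to_lines_spec : Claim_equal_split_by_words_to_lines := by
  intro text min_words max_words _hdom hpre
  have hm : 1 ≤ max_words := hpre
  obtain ⟨k, hmw⟩ : ∃ k : Nat, max_words = (k : Int) + 1 := ⟨(max_words - 1).toNat, by omega⟩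
  unfold Spec_split_by_words_to_lines split_by_words_to_lines split_by_words_to_lines_alt
  rw [hmw]
  dsimp only
  set ws := PySem.Str.split₀ (PySem.Str.strip text) with hws
  -- A side
  have hA := pvA_loop k ws [] [] (by simp)
  simp only [pvFlush] at hA
  rw [show ([] : List String) ++ pvChunks k ([] ++ ws) = pvChunks k ws by simp] at hA
  rw [hA]
  -- B side
  rw [PySem.List.pyRange_of_pos 0 (ws.length : Int) (by positivity), List.map_map]
  have hfun : ((fun i => PySem.Str.join " " (PySem.List.slice ws (some i) (some (i + ((k:Int)+1))))) ∘
      (fun j : Nat => 0 + ((k:Int)+1) * (j : Int)))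
      = (fun j : Nat => PySem.Str.join " " ((ws.drop ((k+1) * j)).take (k+1))) := by
    funext j
    simp only [Function.comp]
    have h1 : 0 + ((k:Int)+1) * (j : Int) = (((k+1) * j : Nat) : Int) := by push_cast; ring
    rw [h1, show (((k+1) * j : Nat) : Int) + ((k:Int)+1) = (((k+1) * j : Nat) : Int) + ((k+1 : Nat) : Int) by push_cast; ring,
        PySem.List.slice_natCast_add]
  rw [hfun]
  exact (pvB_map k ws.length ws le_rfl).symm
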